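-- pv_equiv track=rewrite | github.com/Matt740/School | Python Projects ESC180/Project2_Gomoku_Bot.py | detect_rows_diagonal_left_bottom_is_win
-- ===== SOURCE A (Python) =====
-- def is_bounded_start(board, y_end, x_end, length, d_y, d_x): # Helper function for is_bounded
--     '''returns True if the sequence of length length that ends at location (y_end, x_end) is bounded at the end opposite of (y_end, x_end)'''
--     if y_end - length*d_y > 7 or y_end - length*d_y < 0:
--         return True
--     elif x_end - length*d_x > 7 or x_end - length*d_x < 0:
--         return True
--     elif board[y_end - length*d_y][x_end - length*d_x] != ' ':
--         return True
--     return False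
--
-- def is_bounded_end(board, y_end, x_end, length, d_y, d_x): # Helper function for is_bounded
--     '''returns True if the sequence of length length that ends at location (y_end, x_end) is bounded at the end (y_end, x_end)'''
--     if y_end + d_y > 7 or y_end + d_y < 0:
--         return True
--     elif x_end + d_x > 7 or x_end + d_x < 0:
--         return True
--     elif board[y_end + d_y][x_end + d_x] != ' ':
--         return True
--     return False
--
-- def is_bounded(board, y_end, x_end, length, d_y, d_x):
--     '''analyses the sequence of length length that ends at location (y_end, x_end). The function returns "OPEN" if the sequence is open, "SEMIOPEN" if the sequence if semi-open, and "CLOSED" if the sequence is closed.'''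
--     if is_bounded_start(board, y_end, x_end, length, d_y, d_x) == True and is_bounded_end(board, y_end, x_end, length, d_y, d_x) == True:
--         return "CLOSED"
--     elif is_bounded_start(board, y_end, x_end, length, d_y, d_x) == True and is_bounded_end(board, y_end, x_end, length, d_y, d_x) == False:
--         return "SEMIOPEN"
--     elif is_bounded_start(board, y_end, x_end, length, d_y, d_x) == False and is_bounded_end(board, y_end, x_end, length, d_y, d_x) == True:
--         return "SEMIOPEN"
--     elif is_bounded_start(board, y_end, x_end, length, d_y, d_x) == False and is_bounded_end(board, y_end, x_end, length, d_y, d_x) == False: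
--         return "OPEN"
--
-- def detect_row_is_win(board, col, y_start, x_start, length, d_y, d_x):
--     open_seq_count = 0
--     semi_open_seq_count = 0
--     closed_seq_count = 0
--     counter = 0
--     while 0 <= y_start + (length-1)*d_y <= 7 and 0 <= x_start + (length-1)*d_x <= 7:
--         for i in range(length):
--             if board[y_start + i*d_y][x_start + i*d_x] == col:
--                 counter += 1
--         if counter == length:
--             if is_bounded(board, y_start, x_start, length, -d_y, -d_x) == "SEMIOPEN":
--                 semi_open_seq_count += 1
--             elif is_bounded(board, y_start, x_start, length, -d_y, -d_x) == "OPEN":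
--                 open_seq_count += 1
--             elif is_bounded(board, y_start, x_start, length, -d_y, -d_x) == "CLOSED":
--                 closed_seq_count += 1
--         y_start += d_y
--         x_start += d_x
--         counter = 0
--     return open_seq_count, semi_open_seq_count, closed_seq_count
--
-- def detect_rows_diagonal_left_bottom_is_win(board, col, length):
--     open_seq_count = 0
--     semi_open_seq_count = 0
--     closed_seq_count = 0
--     y_diagonal_start = 0
--     res = ()
--     for i in range(1, 9):
--         res += detect_row_is_win(board, col, y_diagonal_start, 0, length, 1, 1)
--         y_diagonal_start = 0
--         y_diagonal_start += i
--     for j in range(1, len(res), 3):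
--         semi_open_seq_count += res[j]
--     for k in range(0, len(res), 3):
--         open_seq_count += res[k]
--     for h in range(2, len(res), 3):
--         closed_seq_count += res[h]
--     return open_seq_count, semi_open_seq_count, closed_seq_count
-- ===== SOURCE B (Python) =====
-- def detect_rows_diagonal_left_bottom_is_win(board, col, length):
--     # Walk each left-bottom diagonal once as an extracted list and classify every
--     # length-run of col by its two neighbouring cells, instead of re-counting each
--     # window and concatenating per-diagonal triples into a flat tuple with three
--     # strided summation passes.
--     if length < 1 or length > 8:
--         return 0, 0, 0
--     open_count = semi_count = closed_count = 0
--     for y0 in range(8):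
--         n = 8 - y0
--         diag = [board[y0 + k][k] for k in range(n)]
--         for s in range(n - length + 1):
--             if diag[s:s + length] == [col] * length:
--                 start_bounded = s == 0 or diag[s - 1] != ' '
--                 end_bounded = s + length == n or diag[s + length] != ' '
--                 if start_bounded and end_bounded:
--                     closed_count += 1
--                 elif start_bounded or end_bounded:
--                     semi_count += 1
--                 else:
--                     open_count += 1
--     return open_count, semi_count, closed_count
-- ===== Notes on version B (the rewrite author's own statement) =====
-- stated objective: simpler
-- what changed: B walks each of the 8 left-bottom diagonals once as an extracted list, classifying every length-run of col by its two neighbouring diagonal cells directly, instead of A's per-window re-count with helper bound checks, flattening of per-diagonal triples into a 24-tuple and three strided summation passes.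
import Mathlib
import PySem

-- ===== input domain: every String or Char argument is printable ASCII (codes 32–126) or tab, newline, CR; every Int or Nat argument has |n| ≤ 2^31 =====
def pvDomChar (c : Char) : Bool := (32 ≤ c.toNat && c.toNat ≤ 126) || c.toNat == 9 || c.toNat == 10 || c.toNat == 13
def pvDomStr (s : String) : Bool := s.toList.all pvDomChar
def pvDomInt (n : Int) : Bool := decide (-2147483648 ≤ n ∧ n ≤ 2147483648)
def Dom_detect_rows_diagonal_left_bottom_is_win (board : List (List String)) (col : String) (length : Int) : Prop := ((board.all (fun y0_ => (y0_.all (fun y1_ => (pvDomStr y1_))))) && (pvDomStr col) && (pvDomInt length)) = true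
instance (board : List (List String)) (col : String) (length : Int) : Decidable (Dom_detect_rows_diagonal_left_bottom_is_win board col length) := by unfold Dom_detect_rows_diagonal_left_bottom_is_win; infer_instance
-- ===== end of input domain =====

-- B walks each left-bottom diagonal once as an extracted list and classifies every run
-- directly (objective: simpler), instead of A's re-counted windows, flat tuple and three
-- strided summation passes; equivalence is on Pre_ (where Python A raises no IndexError).

-- board[y][x]; the `.getD` defaults are only reached where Python raises IndexError — excluded by Pre_
def pvCell (board : List (List String)) (y x : Int) : String :=
  ((PySem.List.pyGet? board y).bind (fun r => PySem.List.pyGet? r x)).getD ""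

-- ===== PORT A =====
def is_bounded_start (board : List (List String)) (y_end x_end length d_y d_x : Int) : Bool :=
  if y_end - length*d_y > 7 ∨ y_end - length*d_y < 0 then true
  else if x_end - length*d_x > 7 ∨ x_end - length*d_x < 0 then true
  else if pvCell board (y_end - length*d_y) (x_end - length*d_x) ≠ " " then true
  else false

def is_bounded_end (board : List (List String)) (y_end x_end length d_y d_x : Int) : Bool :=
  if y_end + d_y > 7 ∨ y_end + d_y < 0 then true
  else if x_end + d_x > 7 ∨ x_end + d_x < 0 then true
  else if pvCell board (y_end + d_y) (x_end + d_x) ≠ " " then true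
  else false

-- the four branches are exhaustive (Python never falls through to an implicit None)
def is_bounded (board : List (List String)) (y_end x_end length d_y d_x : Int) : String :=
  if is_bounded_start board y_end x_end length d_y d_x = true ∧ is_bounded_end board y_end x_end length d_y d_x = true then "CLOSED"
  else if is_bounded_start board y_end x_end length d_y d_x = true ∧ is_bounded_end board y_end x_end length d_y d_x = false then "SEMIOPEN"
  else if is_bounded_start board y_end x_end length d_y d_x = false ∧ is_bounded_end board y_end x_end length d_y d_x = true then "SEMIOPEN"
  else "OPEN"

-- A's while loop; fuel only makes it total (every call the entry makes finishes in ≤ 9 iterations)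
def detect_row_is_win_loop (board : List (List String)) (col : String) (length d_y d_x : Int)
    (fuel : Nat) (y_start x_start open_c semi_c closed_c : Int) : Int × Int × Int :=
  match fuel with
  | 0 => (open_c, semi_c, closed_c)
  | Nat.succ fuel =>
    if 0 ≤ y_start + (length-1)*d_y ∧ y_start + (length-1)*d_y ≤ 7 ∧
       0 ≤ x_start + (length-1)*d_x ∧ x_start + (length-1)*d_x ≤ 7 then
      let counter : Int := (PySem.List.pyRange 0 length 1).foldl
        (fun acc i => if pvCell board (y_start + i*d_y) (x_start + i*d_x) = col then acc + 1 else acc) 0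
      let st :=
        if counter = length then
          if is_bounded board y_start x_start length (-d_y) (-d_x) = "SEMIOPEN" then (open_c, semi_c + 1, closed_c)
          else if is_bounded board y_start x_start length (-d_y) (-d_x) = "OPEN" then (open_c + 1, semi_c, closed_c)
          else if is_bounded board y_start x_start length (-d_y) (-d_x) = "CLOSED" then (open_c, semi_c, closed_c + 1)
          else (open_c, semi_c, closed_c)
        else (open_c, semi_c, closed_c)
      detect_row_is_win_loop board col length d_y d_x fuel (y_start + d_y) (x_start + d_x) st.1 st.2.1 st.2.2
    else (open_c, semi_c, closed_c)

def detect_row_is_win (board : List (List String)) (col : String) (y_start x_start length d_y d_x : Int) : Int × Int × Int :=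
  detect_row_is_win_loop board col length d_y d_x 16 y_start x_start 0 0 0

def detect_rows_diagonal_left_bottom_is_win (board : List (List String)) (col : String) (length : Int) : Int × Int × Int :=
  -- res is the flat tuple built by `res += detect_row_is_win(...)`; the pair's second slot is y_diagonal_start
  let st := (PySem.List.pyRange 1 9 1).foldl
    (fun (st : List Int × Int) i =>
      let t := detect_row_is_win board col st.2 0 length 1 1
      (st.1 ++ [t.1, t.2.1, t.2.2], 0 + i)) ([], 0)
  let res := st.1
  let semi_open_seq_count := (PySem.List.pyRange 1 (res.length : Int) 3).foldl
    (fun acc j => acc + (PySem.List.pyGet? res j).getD 0) 0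
  let open_seq_count := (PySem.List.pyRange 0 (res.length : Int) 3).foldl
    (fun acc k => acc + (PySem.List.pyGet? res k).getD 0) 0
  let closed_seq_count := (PySem.List.pyRange 2 (res.length : Int) 3).foldl
    (fun acc h => acc + (PySem.List.pyGet? res h).getD 0) 0
  (open_seq_count, semi_open_seq_count, closed_seq_count)

-- ===== PORT B =====
-- the body of Source B's inner `for s in range(n - length + 1)` loop (one window)
def pvStep (diag : List String) (col : String) (L n s : Nat) (acc : Int × Int × Int) : Int × Int × Int :=
  if (diag.drop s).take L = List.replicate L col then
    if (s = 0 ∨ diag.getD (s-1) "" ≠ " ") ∧ (s + L = n ∨ diag.getD (s+L) "" ≠ " ") then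
      (acc.1, acc.2.1, acc.2.2 + 1)
    else if (s = 0 ∨ diag.getD (s-1) "" ≠ " ") ∨ (s + L = n ∨ diag.getD (s+L) "" ≠ " ") then
      (acc.1, acc.2.1 + 1, acc.2.2)
    else (acc.1 + 1, acc.2.1, acc.2.2)
  else acc

-- Source B's inner loop, counting s upward
def pvAltGo (diag : List String) (col : String) (L n s : Nat) (acc : Int × Int × Int) : Int × Int × Int :=
  if h : s < n + 1 - L then
    pvAltGo diag col L n (s+1) (pvStep diag col L n s acc)
  else acc
termination_by n + 1 - L - s

def detect_rows_diagonal_left_bottom_is_win_alt (board : List (List String)) (col : String) (length : Int) : Int × Int × Int :=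
  if length < 1 ∨ 8 < length then (0, 0, 0) else
  let L := length.toNat
  (List.range 8).foldl (fun acc y0 =>
    let n := 8 - y0
    let diag := (List.range n).map (fun k => pvCell board ((y0 + k : Nat) : Int) (k : Int))
    pvAltGo diag col L n 0 acc) (0, 0, 0)

-- ===== PRECONDITION & SPEC =====
-- Pre_ excludes exactly the boards on which Python A raises IndexError: for length in 1..8 the
-- scan reads, in every row y < 8, the diagonal cells up to column y, so it needs 8 rows with
-- row y at least y+1 long; for any other length A touches no cell and returns (0,0,0).
def Pre_detect_rows_diagonal_left_bottom_is_win (board : List (List String)) (col : String) (length : Int) : Prop :=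
  (1 ≤ length ∧ length ≤ 8) → (8 ≤ board.length ∧ ∀ y ∈ List.range 8, y + 1 ≤ (board.getD y []).length)
instance (board : List (List String)) (col : String) (length : Int) : Decidable (Pre_detect_rows_diagonal_left_bottom_is_win board col length) := by unfold Pre_detect_rows_diagonal_left_bottom_is_win; infer_instance

def pvWitness_detect_rows_diagonal_left_bottom_is_win : List (List String) × String × Int :=
  ([[" ", " ", " ", " ", " ", " ", " ", " "],
    ["b", "b", " ", " ", " ", " ", " ", " "],
    [" ", "b", "b", " ", " ", " ", " ", " "],
    [" ", " ", "b", " ", " ", " ", " ", " "],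
    ["w", " ", " ", " ", " ", " ", " ", " "],
    [" ", "w", " ", " ", " ", " ", " ", " "],
    [" ", " ", "w", " ", " ", " ", " ", " "],
    [" ", " ", " ", "w", " ", " ", " ", " "]], "b", 2)

def Spec_detect_rows_diagonal_left_bottom_is_win (board : List (List String)) (col : String) (length : Int) (out : Int × Int × Int) : Prop := out = detect_rows_diagonal_left_bottom_is_win_alt board col length
instance (board : List (List String)) (col : String) (length : Int) (out : Int × Int × Int) : Decidable (Spec_detect_rows_diagonal_left_bottom_is_win board col length out) := by unfold Spec_detect_rows_diagonal_left_bottom_is_win; infer_instance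

-- ===== CLAIM (what is proved, stated in full; the proofs are below) =====
def Claim_equal_detect_rows_diagonal_left_bottom_is_win : Prop := ∀ (board : List (List String)) (col : String) (length : Int), Dom_detect_rows_diagonal_left_bottom_is_win board col length → Pre_detect_rows_diagonal_left_bottom_is_win board col length → Spec_detect_rows_diagonal_left_bottom_is_win board col length (detect_rows_diagonal_left_bottom_is_win board col length)

-- ===== LEMMAS AND PROOFS =====

-- B's diagonal list, named for the proofs
def pvDiag (board : List (List String)) (y0 : Nat) : List String :=
  (List.range (8 - y0)).map (fun k => pvCell board ((y0 + k : Nat) : Int) (k : Int))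

lemma pvDiag_getD (board : List (List String)) (y0 k : Nat) (h : k < 8 - y0) :
    (pvDiag board y0).getD k "" = pvCell board ((y0 + k : Nat) : Int) (k : Int) := by
  unfold pvDiag
  exact PySem.List.getD_map_range _ _ _ _ h

lemma pvDiag_length (board : List (List String)) (y0 : Nat) :
    (pvDiag board y0).length = 8 - y0 := by
  simp [pvDiag]

-- the slice test of Source B says: all L cells of the window are col
lemma pvSlice_iff (diag : List String) (col : String) (L n s : Nat)
    (hlen : diag.length = n) (hs : s + L ≤ n) :
    ((diag.drop s).take L = List.replicate L col) ↔ (∀ k < L, diag.getD (s + k) "" = col) := by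
  rw [List.eq_replicate_iff]
  constructor
  · rintro ⟨hl, hall⟩ k hk
    have hsk : s + k < diag.length := by omega
    have hmem : diag[s + k] ∈ (diag.drop s).take L := by
      have hk' : k < ((diag.drop s).take L).length := by
        simp [List.length_take, List.length_drop]; omega
      have : ((diag.drop s).take L)[k] = diag[s + k] := by
        rw [List.getElem_take, List.getElem_drop]
      rw [← this]
      exact List.getElem_mem hk'
    rw [List.getD_eq_getElem diag "" hsk]
    exact hall _ hmem
  · intro hall
    refine ⟨by simp [List.length_take, List.length_drop]; omega, ?_⟩
    intro b hb
    obtain ⟨k, hk, hbk⟩ := List.mem_iff_getElem.mp hb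
    have hk' : k < L := by
      have := hk; simp [List.length_take, List.length_drop] at this; omega
    have hsk : s + k < diag.length := by omega
    have : ((diag.drop s).take L)[k] = diag[s + k] := by
      rw [List.getElem_take, List.getElem_drop]
    rw [this] at hbk
    rw [← hbk, ← List.getD_eq_getElem diag "" hsk]
    exact hall k hk'

-- A's counter equals length iff all window cells are col
lemma pvCounter_iff (board : List (List String)) (col : String) (L : Int) (hL : 1 ≤ L)
    (Y X : Int) :
    ((PySem.List.pyRange 0 L 1).foldl
        (fun acc i => if pvCell board (Y + i*1) (X + i*1) = col then acc + 1 else acc) 0 = L)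
      ↔ (∀ k < L.toNat, pvCell board (Y + (k : Int)) (X + (k : Int)) = col) := by
  rw [PySem.List.pyRange_one]
  rw [List.foldl_map]
  have hrw : (fun (acc : Int) (k : Nat) =>
      if pvCell board (Y + ((0:Int) + (k:Int))*1) (X + ((0:Int) + (k:Int))*1) = col then acc + 1 else acc)
      = (fun (acc : Int) (k : Nat) =>
      if (fun k : Nat => decide (pvCell board (Y + (k:Int)) (X + (k:Int)) = col)) k = true then acc + 1 else acc) := by
    funext acc k
    simp [mul_one]
  rw [hrw, PySem.List.foldl_count_if]
  have h0 : ((L - 0).toNat) = L.toNat := by omega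
  rw [h0]
  have hle := List.countP_le_length
    (p := fun k : Nat => decide (pvCell board (Y + (k:Int)) (X + (k:Int)) = col)) (l := List.range L.toNat)
  rw [List.length_range] at hle
  have hiff : (List.countP (fun k : Nat => decide (pvCell board (Y + (k:Int)) (X + (k:Int)) = col)) (List.range L.toNat)) = L.toNat
      ↔ (∀ k < L.toNat, pvCell board (Y + (k:Int)) (X + (k:Int)) = col) := by
    constructor
    · intro h k hk
      have := List.countP_eq_length.mp (by rw [List.length_range]; exact h) k (List.mem_range.mpr hk)
      simpa using this
    · intro h
      have := List.countP_eq_length (p := fun k : Nat => decide (pvCell board (Y + (k:Int)) (X + (k:Int)) = col)).mpr (fun a ha => by simpa using h a (List.mem_range.mp ha))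
      rw [List.length_range] at this
      exact this
  constructor
  · intro h
    exact hiff.mp (by omega)
  · intro h
    have := hiff.mpr h
    omega

lemma pvAltGo_stop (diag : List String) (col : String) (L n s : Nat) (acc : Int × Int × Int)
    (hs : ¬ s < n + 1 - L) : pvAltGo diag col L n s acc = acc := by
  rw [pvAltGo]; exact dif_neg hs

lemma pvAltGo_step (diag : List String) (col : String) (L n s : Nat) (acc : Int × Int × Int)
    (hs : s < n + 1 - L) :
    pvAltGo diag col L n s acc = pvAltGo diag col L n (s+1) (pvStep diag col L n s acc) := by
  rw [pvAltGo]; exact dif_pos hs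

lemma pvStep_shift (diag : List String) (col : String) (L n s : Nat) (p : Int × Int × Int) :
    pvStep diag col L n s p
      = (p.1 + (pvStep diag col L n s (0,0,0)).1,
         p.2.1 + (pvStep diag col L n s (0,0,0)).2.1,
         p.2.2 + (pvStep diag col L n s (0,0,0)).2.2) := by
  unfold pvStep; split_ifs <;> simp

-- A's is_bounded_start call (reversed deltas) tests Source B's end_bounded condition
lemma pvIBstart_eq (board : List (List String)) (L : Int) (h1 : 1 ≤ L) (h8 : L ≤ 8)
    (y0 s : Nat) (hy : y0 < 8) (hs : s < (8 - y0) + 1 - L.toNat) :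
    (is_bounded_start board ((y0:Int)+(s:Int)) (s:Int) L (-1) (-1) = true)
      ↔ (s + L.toNat = 8 - y0 ∨ (pvDiag board y0).getD (s + L.toNat) "" ≠ " ") := by
  have hL' : ((L.toNat : Int)) = L := Int.toNat_of_nonneg (by omega)
  unfold is_bounded_start
  by_cases hend : s + L.toNat = 8 - y0
  · rw [if_pos (by omega)]
    simp [hend]
  · rw [if_neg (by omega), if_neg (by omega)]
    rw [show (y0:Int)+(s:Int) - L*(-1) = ((y0 + (s + L.toNat) : Nat) : Int) by push_cast; omega,
        show (s:Int) - L*(-1) = ((s + L.toNat : Nat) : Int) by push_cast; omega]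
    rw [← pvDiag_getD board y0 (s + L.toNat) (by omega)]
    by_cases hc : (pvDiag board y0).getD (s + L.toNat) "" ≠ " "
    · simp [hend]
    · simp [hend]

-- A's is_bounded_end call (reversed deltas) tests Source B's start_bounded condition
lemma pvIBend_eq (board : List (List String)) (L : Int) (h1 : 1 ≤ L) (h8 : L ≤ 8)
    (y0 s : Nat) (hy : y0 < 8) (hs : s < (8 - y0) + 1 - L.toNat) :
    (is_bounded_end board ((y0:Int)+(s:Int)) (s:Int) L (-1) (-1) = true)
      ↔ (s = 0 ∨ (pvDiag board y0).getD (s - 1) "" ≠ " ") := by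
  have hL' : ((L.toNat : Int)) = L := Int.toNat_of_nonneg (by omega)
  unfold is_bounded_end
  by_cases hz : s = 0
  · by_cases hy0 : y0 = 0
    · rw [if_pos (by omega)]; simp [hz]
    · rw [if_neg (by omega), if_pos (by omega)]; simp [hz]
  · rw [if_neg (by omega), if_neg (by omega)]
    rw [show (y0:Int)+(s:Int) + (-1) = ((y0 + (s - 1) : Nat) : Int) by push_cast [Nat.cast_sub (by omega : 1 ≤ s)]; omega,
        show (s:Int) + (-1) = ((s - 1 : Nat) : Int) by push_cast [Nat.cast_sub (by omega : 1 ≤ s)]; omega]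
    rw [← pvDiag_getD board y0 (s - 1) (by omega)]
    by_cases hc : (pvDiag board y0).getD (s - 1) "" ≠ " "
    · simp [hz]
    · simp [hz]

-- core loop lemma: A's while-loop = B's per-diagonal recursion
lemma pvLoop_eq (board : List (List String)) (col : String) (L : Int)
    (h1 : 1 ≤ L) (h8 : L ≤ 8) (y0 : Nat) (hy : y0 < 8) :
    ∀ (fuel s : Nat) (acc : Int × Int × Int), (8 - y0) + 1 - L.toNat - s < fuel →
    detect_row_is_win_loop board col L 1 1 fuel ((y0 : Int) + (s : Int)) (s : Int) acc.1 acc.2.1 acc.2.2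
      = pvAltGo (pvDiag board y0) col L.toNat (8 - y0) s acc := by
  have hL' : ((L.toNat : Int)) = L := Int.toNat_of_nonneg (by omega)
  intro fuel
  induction fuel with
  | zero => intro s acc h; omega
  | succ fuel ih =>
    intro s acc h
    rw [detect_row_is_win_loop]
    by_cases hs : s < (8 - y0) + 1 - L.toNat
    · rw [if_pos (by omega)]
      have hwin : (((PySem.List.pyRange 0 L 1).foldl
          (fun acc i => if pvCell board ((y0:Int)+(s:Int) + i*1) ((s:Int) + i*1) = col then acc + 1 else acc) 0 : Int) = L)
          ↔ ((pvDiag board y0).drop s).take L.toNat = List.replicate L.toNat col := by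
        rw [pvCounter_iff board col L h1 ((y0:Int)+(s:Int)) (s:Int),
            pvSlice_iff (pvDiag board y0) col L.toNat (8 - y0) s (pvDiag_length board y0) (by omega)]
        constructor
        · intro hall k hk
          rw [pvDiag_getD board y0 (s+k) (by omega)]
          rw [show ((y0 + (s + k) : Nat) : Int) = (y0:Int)+(s:Int) + (k:Int) by push_cast; ring,
              show ((s + k : Nat) : Int) = (s:Int) + (k:Int) by push_cast; ring]
          exact hall k hk
        · intro hall k hk
          have := hall k hk
          rw [pvDiag_getD board y0 (s+k) (by omega)] at this
          rw [show ((y0 + (s + k) : Nat) : Int) = (y0:Int)+(s:Int) + (k:Int) by push_cast; ring,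
              show ((s + k : Nat) : Int) = (s:Int) + (k:Int) by push_cast; ring] at this
          exact this
      have hstep : (if (((PySem.List.pyRange 0 L 1).foldl
          (fun acc i => if pvCell board ((y0:Int)+(s:Int) + i*1) ((s:Int) + i*1) = col then acc + 1 else acc) 0 : Int) = L) then
            if is_bounded board ((y0:Int)+(s:Int)) (s:Int) L (-1) (-1) = "SEMIOPEN" then (acc.1, acc.2.1 + 1, acc.2.2)
            else if is_bounded board ((y0:Int)+(s:Int)) (s:Int) L (-1) (-1) = "OPEN" then (acc.1 + 1, acc.2.1, acc.2.2)
            else if is_bounded board ((y0:Int)+(s:Int)) (s:Int) L (-1) (-1) = "CLOSED" then (acc.1, acc.2.1, acc.2.2 + 1)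
            else (acc.1, acc.2.1, acc.2.2)
          else (acc.1, acc.2.1, acc.2.2))
          = pvStep (pvDiag board y0) col L.toNat (8 - y0) s acc := by
        unfold pvStep
        by_cases hw : ((pvDiag board y0).drop s).take L.toNat = List.replicate L.toNat col
        · rw [if_pos (hwin.mpr hw), if_pos hw]
          by_cases hSB : (s = 0 ∨ (pvDiag board y0).getD (s-1) "" ≠ " ")
          <;> by_cases hEB : (s + L.toNat = 8 - y0 ∨ (pvDiag board y0).getD (s + L.toNat) "" ≠ " ")
          · have hE : is_bounded_start board ((y0:Int)+(s:Int)) (s:Int) L (-1) (-1) = true :=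
              (pvIBstart_eq board L h1 h8 y0 s hy hs).mpr hEB
            have hS : is_bounded_end board ((y0:Int)+(s:Int)) (s:Int) L (-1) (-1) = true :=
              (pvIBend_eq board L h1 h8 y0 s hy hs).mpr hSB
            have hIB : is_bounded board ((y0:Int)+(s:Int)) (s:Int) L (-1) (-1) = "CLOSED" := by
              unfold is_bounded; rw [hE, hS]; simp
            rw [hIB, if_neg (by decide : ¬("CLOSED":String) = "SEMIOPEN"), if_neg (by decide : ¬("CLOSED":String) = "OPEN"), if_pos (rfl : ("CLOSED":String) = "CLOSED"), if_pos ⟨hSB, hEB⟩]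
          · have hE : is_bounded_start board ((y0:Int)+(s:Int)) (s:Int) L (-1) (-1) = false :=
              Bool.eq_false_iff.mpr (fun hx => hEB ((pvIBstart_eq board L h1 h8 y0 s hy hs).mp hx))
            have hS : is_bounded_end board ((y0:Int)+(s:Int)) (s:Int) L (-1) (-1) = true :=
              (pvIBend_eq board L h1 h8 y0 s hy hs).mpr hSB
            have hIB : is_bounded board ((y0:Int)+(s:Int)) (s:Int) L (-1) (-1) = "SEMIOPEN" := by
              unfold is_bounded; rw [hE, hS]; simp
            rw [hIB, if_pos (rfl : ("SEMIOPEN":String) = "SEMIOPEN"), if_neg (fun hc => hEB hc.2), if_pos (Or.inl hSB)]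
          · have hE : is_bounded_start board ((y0:Int)+(s:Int)) (s:Int) L (-1) (-1) = true :=
              (pvIBstart_eq board L h1 h8 y0 s hy hs).mpr hEB
            have hS : is_bounded_end board ((y0:Int)+(s:Int)) (s:Int) L (-1) (-1) = false :=
              Bool.eq_false_iff.mpr (fun hx => hSB ((pvIBend_eq board L h1 h8 y0 s hy hs).mp hx))
            have hIB : is_bounded board ((y0:Int)+(s:Int)) (s:Int) L (-1) (-1) = "SEMIOPEN" := by
              unfold is_bounded; rw [hE, hS]; simp
            rw [hIB, if_pos (rfl : ("SEMIOPEN":String) = "SEMIOPEN"), if_neg (fun hc => hSB hc.1), if_pos (Or.inr hEB)]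
          · have hE : is_bounded_start board ((y0:Int)+(s:Int)) (s:Int) L (-1) (-1) = false :=
              Bool.eq_false_iff.mpr (fun hx => hEB ((pvIBstart_eq board L h1 h8 y0 s hy hs).mp hx))
            have hS : is_bounded_end board ((y0:Int)+(s:Int)) (s:Int) L (-1) (-1) = false :=
              Bool.eq_false_iff.mpr (fun hx => hSB ((pvIBend_eq board L h1 h8 y0 s hy hs).mp hx))
            have hIB : is_bounded board ((y0:Int)+(s:Int)) (s:Int) L (-1) (-1) = "OPEN" := by
              unfold is_bounded; rw [hE, hS]; simp
            rw [hIB, if_neg (by decide : ¬("OPEN":String) = "SEMIOPEN"), if_pos (rfl : ("OPEN":String) = "OPEN"), if_neg (fun hc => hSB hc.1), if_neg (fun hc => hc.elim hSB hEB)]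
        · rw [if_neg (fun hc => hw (hwin.mp hc)), if_neg hw]
      show detect_row_is_win_loop board col L 1 1 fuel ((y0:Int)+(s:Int) + 1) ((s:Int) + 1)
          (if (((PySem.List.pyRange 0 L 1).foldl
            (fun acc i => if pvCell board ((y0:Int)+(s:Int) + i*1) ((s:Int) + i*1) = col then acc + 1 else acc) 0 : Int) = L) then
              if is_bounded board ((y0:Int)+(s:Int)) (s:Int) L (-1) (-1) = "SEMIOPEN" then (acc.1, acc.2.1 + 1, acc.2.2)
              else if is_bounded board ((y0:Int)+(s:Int)) (s:Int) L (-1) (-1) = "OPEN" then (acc.1 + 1, acc.2.1, acc.2.2)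
              else if is_bounded board ((y0:Int)+(s:Int)) (s:Int) L (-1) (-1) = "CLOSED" then (acc.1, acc.2.1, acc.2.2 + 1)
              else (acc.1, acc.2.1, acc.2.2)
            else (acc.1, acc.2.1, acc.2.2)).1 _ _
          = pvAltGo (pvDiag board y0) col L.toNat (8 - y0) s acc
      rw [hstep]
      rw [show (y0:Int) + (s:Int) + 1 = (y0:Int) + (((s+1 : Nat)) : Int) by push_cast; ring,
          show (s:Int) + 1 = (((s+1 : Nat)) : Int) by push_cast; ring]
      rw [ih (s+1) (pvStep (pvDiag board y0) col L.toNat (8 - y0) s acc) (by omega)]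
      rw [pvAltGo_step _ _ _ _ _ _ hs]
    · rw [if_neg (by omega), pvAltGo_stop _ _ _ _ _ _ hs]

-- per-diagonal: A's detect_row_is_win call = B's pvAltGo from s = 0
lemma pvRow_eq (board : List (List String)) (col : String) (L : Int)
    (h1 : 1 ≤ L) (h8 : L ≤ 8) (y0 : Nat) (hy : y0 < 8) :
    detect_row_is_win board col (y0 : Int) 0 L 1 1
      = pvAltGo (pvDiag board y0) col L.toNat (8 - y0) 0 (0, 0, 0) := by
  have := pvLoop_eq board col L h1 h8 y0 hy 16 0 (0, 0, 0) (by omega)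
  simpa [detect_row_is_win] using this

-- accumulator shift for B's recursion
lemma pvAltGo_shift (diag : List String) (col : String) (L n : Nat) :
    ∀ (m s : Nat) (p : Int × Int × Int), m = n + 1 - L - s →
    pvAltGo diag col L n s p
      = (p.1 + (pvAltGo diag col L n s (0,0,0)).1,
         p.2.1 + (pvAltGo diag col L n s (0,0,0)).2.1,
         p.2.2 + (pvAltGo diag col L n s (0,0,0)).2.2) := by
  intro m
  induction m with
  | zero =>
    intro s p hm
    have hs : ¬ s < n + 1 - L := by omega
    rw [pvAltGo_stop _ _ _ _ _ _ hs, pvAltGo_stop _ _ _ _ _ _ hs]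
    simp
  | succ m ih =>
    intro s p hm
    by_cases hs : s < n + 1 - L
    · rw [pvAltGo_step _ _ _ _ _ p hs, pvAltGo_step _ _ _ _ _ (0,0,0) hs,
          ih (s+1) (pvStep diag col L n s p) (by omega),
          ih (s+1) (pvStep diag col L n s (0,0,0)) (by omega),
          pvStep_shift diag col L n s p]
      simp [add_assoc]
    · rw [pvAltGo_stop _ _ _ _ _ _ hs, pvAltGo_stop _ _ _ _ _ _ hs]
      simp

-- A's detect_row_is_win returns (0,0,0) whenever length is outside 1..8 (the while-test fails at entry)
lemma pvRow_zero (board : List (List String)) (col : String) (L : Int) (y0 : Int)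
    (_hy : 0 ≤ y0) (hL : L < 1 ∨ 8 < L) :
    detect_row_is_win board col y0 0 L 1 1 = (0, 0, 0) := by
  unfold detect_row_is_win detect_row_is_win_loop
  rw [if_neg (by omega)]

lemma pvAltGo_shift' (diag : List String) (col : String) (L n s : Nat) (p : Int × Int × Int) :
    pvAltGo diag col L n s p
      = (p.1 + (pvAltGo diag col L n s (0,0,0)).1,
         p.2.1 + (pvAltGo diag col L n s (0,0,0)).2.1,
         p.2.2 + (pvAltGo diag col L n s (0,0,0)).2.2) :=
  pvAltGo_shift diag col L n (n + 1 - L - s) s p rfl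

lemma pvDiag_eq (board : List (List String)) (y0 : Nat) :
    ((List.range (8 - y0)).map (fun k => pvCell board ((y0 + k : Nat) : Int) (k : Int))) = pvDiag board y0 := rfl

-- ===== VERDICT (by name: the statement is the Claim_ definition above) =====
theorem detect_rows_diagonal_left_bottom_is_win_spec : Claim_equal_detect_rows_diagonal_left_bottom_is_win := by
  unfold Claim_equal_detect_rows_diagonal_left_bottom_is_win
  intro board col length hdom hpre
  unfold Spec_detect_rows_diagonal_left_bottom_is_win
  by_cases hgood : 1 ≤ length ∧ length ≤ 8
  · obtain ⟨hg1, hg8⟩ := hgood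
    have e0 := pvRow_eq board col length hg1 hg8 0 (by norm_num)
    have e1 := pvRow_eq board col length hg1 hg8 1 (by norm_num)
    have e2 := pvRow_eq board col length hg1 hg8 2 (by norm_num)
    have e3 := pvRow_eq board col length hg1 hg8 3 (by norm_num)
    have e4 := pvRow_eq board col length hg1 hg8 4 (by norm_num)
    have e5 := pvRow_eq board col length hg1 hg8 5 (by norm_num)
    have e6 := pvRow_eq board col length hg1 hg8 6 (by norm_num)
    have e7 := pvRow_eq board col length hg1 hg8 7 (by norm_num)
    norm_num at e0 e1 e2 e3 e4 e5 e6 e7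
    unfold detect_rows_diagonal_left_bottom_is_win detect_rows_diagonal_left_bottom_is_win_alt
    rw [if_neg (by omega)]
    rw [show PySem.List.pyRange 1 9 1 = [1,2,3,4,5,6,7,8] from by decide,
        show List.range 8 = [0,1,2,3,4,5,6,7] from rfl]
    simp only [List.foldl, pvDiag_eq]
    norm_num
    rw [pvAltGo_shift' (pvDiag board 7), pvAltGo_shift' (pvDiag board 6),
        pvAltGo_shift' (pvDiag board 5), pvAltGo_shift' (pvDiag board 4),
        pvAltGo_shift' (pvDiag board 3), pvAltGo_shift' (pvDiag board 2),
        pvAltGo_shift' (pvDiag board 1)]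
    rw [e0, e1, e2, e3, e4, e5, e6, e7]
    generalize pvAltGo (pvDiag board 0) col length.toNat 8 0 (0,0,0) = a0
    generalize pvAltGo (pvDiag board 1) col length.toNat 7 0 (0,0,0) = a1
    generalize pvAltGo (pvDiag board 2) col length.toNat 6 0 (0,0,0) = a2
    generalize pvAltGo (pvDiag board 3) col length.toNat 5 0 (0,0,0) = a3
    generalize pvAltGo (pvDiag board 4) col length.toNat 4 0 (0,0,0) = a4
    generalize pvAltGo (pvDiag board 5) col length.toNat 3 0 (0,0,0) = a5
    generalize pvAltGo (pvDiag board 6) col length.toNat 2 0 (0,0,0) = a6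
    generalize pvAltGo (pvDiag board 7) col length.toNat 1 0 (0,0,0) = a7
    rw [show PySem.List.pyRange 0 24 3 = [0,3,6,9,12,15,18,21] from by decide,
        show PySem.List.pyRange 1 24 3 = [1,4,7,10,13,16,19,22] from by decide,
        show PySem.List.pyRange 2 24 3 = [2,5,8,11,14,17,20,23] from by decide]
    simp only [List.foldl]
    simp [PySem.List.pyGet?, PySem.List.pyIdx?]
  · unfold detect_rows_diagonal_left_bottom_is_win detect_rows_diagonal_left_bottom_is_win_alt
    rw [if_pos (by omega)]
    have hz : ∀ y : Int, 0 ≤ y → detect_row_is_win board col y 0 length 1 1 = (0,0,0) :=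
      fun y hy => pvRow_zero board col length y hy (by omega)
    rw [show PySem.List.pyRange 1 9 1 = [1,2,3,4,5,6,7,8] from by decide]
    norm_num [hz]
    rw [show PySem.List.pyRange 0 24 3 = [0,3,6,9,12,15,18,21] from by decide,
        show PySem.List.pyRange 1 24 3 = [1,4,7,10,13,16,19,22] from by decide,
        show PySem.List.pyRange 2 24 3 = [2,5,8,11,14,17,20,23] from by decide]
    simp [PySem.List.pyGet?, PySem.List.pyIdx?]
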